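-- pv_equiv track=rewrite | github.com/rohitkumar1999/Codesule-December | coverthemall.py | solve
-- ===== SOURCE A (Python) =====
-- class Fenwick:
--   def __init__(self, n):
--     self.tree = [0]*(n+1)
--     self.n = n
--   def update_point(self, i, val):  # O(log n)
--     i += 1
--     while i <= self.n:
--       self.tree[i] += val
--       i += i & -i
--   def read_prefix(self, i):        # O(log n)
--     i += 1
--     sum = 0
--     while i > 0:
--       sum += self.tree[i]
--       i -= i & -i
--     return sum
--
-- def solve(a):
--   rank = { v[0] : i for i, v in enumerate(sorted(a,key=lambda x:x[0])) }
--   res = []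
--   counts, sums = Fenwick(len(a)), Fenwick(len(a))
--   total_sum = 0
--   for i, x in enumerate(a):
--     r = rank[x[0]]
--     num_smaller = counts.read_prefix(r)
--     sum_smaller = sums.read_prefix(r)
--     res.append((total_sum - 2*sum_smaller + x[0] * (2*num_smaller - i))*x[1])
--     counts.update_point(r, 1)
--     sums.update_point(r, x[0])
--     total_sum += x[0]
--   return res
-- ===== SOURCE B (Python) =====
-- def solve(a):
--   # direct definition: for each element, scan all previous elements and
--   # accumulate the absolute differences, then weight by the second component
--   res = []
--   for i, x in enumerate(a):
--     s = 0
--     for j in range(i):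
--       s += abs(x[0] - a[j][0])
--     res.append(s * x[1])
--   return res
-- ===== Notes on version B (the rewrite author's own statement) =====
-- stated objective: simpler
-- what changed: Replaced the rank dictionary and the two coordinate-compressed Fenwick trees with the direct nested scan summing |a[i][0]-a[j][0]| over all previous elements.
import Mathlib
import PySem

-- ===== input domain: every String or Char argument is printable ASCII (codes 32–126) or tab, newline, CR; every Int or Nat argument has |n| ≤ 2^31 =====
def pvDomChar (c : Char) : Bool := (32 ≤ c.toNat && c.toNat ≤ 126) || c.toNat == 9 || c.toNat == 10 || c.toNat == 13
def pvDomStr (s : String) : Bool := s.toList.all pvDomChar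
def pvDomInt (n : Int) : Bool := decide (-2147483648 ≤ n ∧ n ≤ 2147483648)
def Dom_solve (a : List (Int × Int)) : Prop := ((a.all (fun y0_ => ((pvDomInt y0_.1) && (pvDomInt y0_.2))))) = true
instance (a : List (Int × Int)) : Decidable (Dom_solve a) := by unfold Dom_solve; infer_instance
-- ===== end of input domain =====

-- B replaces A's rank dictionary + two Fenwick trees by the direct nested scan over previous
-- elements (simpler, O(n^2) instead of O(n log n)); equivalence of the return values is proved below.

-- ===== PORT A =====

-- i & -i (Python's lowest-set-bit trick, exact on Int two's-complement semantics)
def pyLow (i : Int) : Int := Int.land i (-i)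

-- Fenwick.update_point: i += 1 done by the caller; while i <= n: tree[i] += val; i += i & -i
-- (the `0 < pyLow i` test is only a totality guard: it holds whenever 0 < i, proved below)
def fenUpdate (tree : List Int) (n i val : Int) : List Int :=
  if _h : i ≤ n then
    let t := tree.set i.toNat (tree.getD i.toNat 0 + val)   -- tree[i] += val (0 < i at every call)
    if _h2 : 0 < pyLow i then fenUpdate t n (i + pyLow i) val else t
  else tree
termination_by (n + 1 - i).toNat
decreasing_by omega

-- Fenwick.read_prefix: while i > 0: sum += tree[i]; i -= i & -i
def fenRead (tree : List Int) (i : Int) : Int :=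
  if _h : 0 < i then
    tree.getD i.toNat 0 + (if _h2 : 0 < pyLow i then fenRead tree (i - pyLow i) else 0)
  else 0
termination_by i.toNat
decreasing_by omega

-- the main loop of solve, over enumerate(a); state: counts.tree, sums.tree, total_sum, res
def solveLoop (rank : PySem.Dict Int Int) (n : Int) :
    List (Int × (Int × Int)) → List Int → List Int → Int → List Int → List Int
  | [], _, _, _, res => res
  | (i, x) :: rest, counts, sums, total, res =>
    let r := rank.getD x.1 0                 -- rank[x[0]]; the key is always present
    let num := fenRead counts (r + 1)        -- counts.read_prefix(r)
    let sm := fenRead sums (r + 1)           -- sums.read_prefix(r)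
    solveLoop rank n rest
      (fenUpdate counts n (r + 1) 1)         -- counts.update_point(r, 1)
      (fenUpdate sums n (r + 1) x.1)         -- sums.update_point(r, x[0])
      (total + x.1)
      (res ++ [(total - 2 * sm + x.1 * (2 * num - i)) * x.2])

def solve (a : List (Int × Int)) : List Int :=
  let s := PySem.List.sorted a (fun x => x.1) false
  let rank := (PySem.List.enumerate s 0).foldl (fun d p => d.insert p.2.1 p.1) PySem.Dict.empty
  solveLoop rank (a.length : Int) (PySem.List.enumerate a 0)
    (List.replicate (a.length + 1) 0) (List.replicate (a.length + 1) 0) 0 []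

-- ===== PORT B =====

-- the inner loop: s = 0; for u in previous firsts: s += abs(v - u)
def sumAbs (v : Int) (prev : List Int) : Int := prev.foldl (fun s u => s + |v - u|) 0

-- the outer loop, carrying the first components already seen
def altLoop (prev : List Int) : List (Int × Int) → List Int
  | [] => []
  | x :: rest => sumAbs x.1 prev * x.2 :: altLoop (prev ++ [x.1]) rest

def solve_alt (a : List (Int × Int)) : List Int := altLoop [] a

-- ===== PRECONDITION & SPEC =====
def Spec_solve (a : List (Int × Int)) (out : List Int) : Prop := out = solve_alt a
instance (a : List (Int × Int)) (out : List Int) : Decidable (Spec_solve a out) := by unfold Spec_solve; infer_instance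

-- ===== CLAIM (what is proved, stated in full; the proofs are below) =====
def Claim_equal_solve : Prop := ∀ (a : List (Int × Int)), Dom_solve a → Spec_solve a (solve a)

-- ===== LEMMAS AND PROOFS =====

theorem ldiff_lowbit (a m : Nat) :
    Nat.ldiff (2 ^ (a + 1) * m + 2 ^ a) (2 ^ (a + 1) * m + 2 ^ a - 1) = 2 ^ a := by
  have hlt : (2:Nat) ^ a < 2 ^ (a+1) := Nat.pow_lt_pow_succ (by norm_num)
  have hpos : 0 < (2:Nat) ^ a := by positivity
  have hsub : 2 ^ (a + 1) * m + 2 ^ a - 1 = 2 ^ (a+1) * m + (2 ^ a - 1) := by omega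
  apply Nat.eq_of_testBit_eq
  intro j
  rw [Nat.testBit_ldiff, hsub, Nat.testBit_two_pow_mul_add m hlt j,
    Nat.testBit_two_pow_mul_add m (by omega) j, Nat.testBit_two_pow]
  by_cases hj : j < a + 1
  · simp only [if_pos hj, Nat.testBit_two_pow_sub_one]
    by_cases hja : a = j
    · subst hja; simp
    · simp [hja]
  · simp only [if_neg hj]; simp; omega
theorem decomp (n : Nat) (h : 0 < n) : ∃ a m, n = 2 ^ (a+1) * m + 2 ^ a := by
  induction n using Nat.strong_induction_on with
  | _ n ih =>
    rcases Nat.even_or_odd n with he | ho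
    · obtain ⟨k, hk⟩ := he
      obtain ⟨a, m, ham⟩ := ih k (by omega) (by omega)
      exact ⟨a + 1, m, by subst hk; rw [ham]; ring⟩
    · obtain ⟨k, hk⟩ := ho
      exact ⟨0, k, by omega⟩
theorem pyLow_decomp (i : Int) (h : 0 < i) :
    ∃ (a m : Nat), i = 2 ^ (a + 1) * (m : Int) + 2 ^ a ∧ pyLow i = 2 ^ a := by
  obtain ⟨k, hk⟩ : ∃ k, i = Int.ofNat (k + 1) := ⟨i.toNat - 1, by simp only [Int.ofNat_eq_natCast]; omega⟩
  obtain ⟨a, m, ham⟩ := decomp (k + 1) (by omega)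
  refine ⟨a, m, by rw [hk]; simp only [Int.ofNat_eq_natCast]; rw [congrArg (fun n : Nat => (n : Int)) ham]; push_cast; ring, ?_⟩
  have hneg : -(Int.ofNat (k + 1)) = Int.negSucc k := rfl
  have : pyLow i = Int.ofNat (Nat.ldiff (k+1) k) := by rw [pyLow, hk, hneg]; rfl
  rw [this]
  have h2 : Nat.ldiff (k+1) k = 2 ^ a := by
    have := ldiff_lowbit a m
    rw [← ham] at this; simpa using this
  rw [h2]; simp

theorem residue_absurd (c : Nat) (x : Int) (hd : (2:Int)^(c+1) ∣ x - 2^c)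
    (h0 : 0 ≤ x) (h1 : x < 2^c) : False := by
  obtain ⟨t, ht⟩ := hd
  have hp : (0:Int) < 2^c := by positivity
  have hc : (2:Int)^(c+1) = 2 * 2^c := by ring
  have hx : x = 2^c + 2 * 2^c * t := by rw [hc] at ht; linarith
  have htneg : t < 0 := by nlinarith
  nlinarith

theorem pyLow_pos (i : Int) (h : 0 < i) : 0 < pyLow i := by
  obtain ⟨a, m, _, hl⟩ := pyLow_decomp i h; rw [hl]; positivity

theorem key_arith (p i : Int) (hp : 0 < p) (hi : 0 < i) (hne : p ≠ i) :
    (p ≤ i - pyLow i ∧ i - pyLow i < p + pyLow p) ↔ (p ≤ i ∧ i < p + pyLow p) := by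
  obtain ⟨A, M, hpd, hpl⟩ := pyLow_decomp p hp
  obtain ⟨B, K, hid, hil⟩ := pyLow_decomp i hi
  rw [hpl, hil]
  have hPA : (0:Int) < 2^A := by positivity
  have hPB : (0:Int) < 2^B := by positivity
  constructor
  · rintro ⟨h1, h2⟩
    refine ⟨by linarith, ?_⟩
    by_cases hBA : B ≤ A
    · by_contra hge
      push Not at hge
      have hdvd : (2:Int)^(B+1) ∣ (i - p - 2^A) - 2^B := by
        have e1 : (i - p - 2^A) - 2^B = 2^(B+1) * K - 2^(A+1) * (M + 1) := by
          rw [hid, hpd]; try ring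
        rw [e1]
        exact dvd_sub (Dvd.intro _ rfl) ((pow_dvd_pow 2 (by omega)).mul_right _)
      exact residue_absurd B (i - p - 2^A) hdvd (by linarith) (by linarith)
    · push Not at hBA
      have hdvd : (2:Int)^(A+1) ∣ (i - 2^B - p) - 2^A := by
        have e1 : (i - 2^B - p) - 2^A = 2^(B+1) * K - 2^(A+1) * (M + 1) := by
          rw [hid, hpd]; try ring
        rw [e1]
        exact dvd_sub ((pow_dvd_pow 2 (by omega)).mul_right _) ((pow_dvd_pow 2 (le_refl _)).mul_right _)
      exact absurd (residue_absurd A (i - 2^B - p) hdvd (by linarith) (by linarith)) (by simp)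
  · rintro ⟨h1, h2⟩
    have hlt : p < i := lt_of_le_of_ne h1 hne
    refine ⟨?_, by linarith⟩
    have hBA : B ≤ A := by
      by_contra hBA
      push Not at hBA
      have hdvd : (2:Int)^(A+1) ∣ (i - p) - 2^A := by
        have e1 : (i - p) - 2^A = 2^(B+1) * K + 2^B - 2^(A+1) * (M + 1) := by
          rw [hid, hpd]; try ring
        rw [e1]
        refine dvd_sub (dvd_add ((pow_dvd_pow 2 (by omega)).mul_right _) (pow_dvd_pow 2 (by omega))) ((pow_dvd_pow 2 (le_refl _)).mul_right _)
      exact absurd (residue_absurd A (i - p) hdvd (by linarith) (by linarith)) (by simp)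
    have hdvd : (2:Int)^B ∣ i - p := by
      have e1 : i - p = 2^(B+1) * K + 2^B - (2^(A+1) * M + 2^A) := by rw [hid, hpd]; try ring
      rw [e1]
      exact dvd_sub (dvd_add ((pow_dvd_pow 2 (by omega)).mul_right _) (pow_dvd_pow 2 (le_refl _)))
        (dvd_add ((pow_dvd_pow 2 (by omega)).mul_right _) (pow_dvd_pow 2 hBA))
    have : (2:Int)^B ≤ i - p := Int.le_of_dvd (by linarith) hdvd
    linarith

def fenPath (i : Int) : List Int :=
  if _h : 0 < i then
    i :: (if _h2 : 0 < pyLow i then fenPath (i - pyLow i) else [])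
  else []
termination_by i.toNat
decreasing_by omega


theorem fenPath_unfold (i : Int) :
    fenPath i = if 0 < i then
      i :: (if 0 < pyLow i then fenPath (i - pyLow i) else []) else [] := by
  rw [fenPath]; simp only [dite_eq_ite]

theorem fenRead_unfold (t : List Int) (i : Int) :
    fenRead t i = if 0 < i then
      t.getD i.toNat 0 + (if 0 < pyLow i then fenRead t (i - pyLow i) else 0) else 0 := by
  rw [fenRead]; simp only [dite_eq_ite]

theorem fenRead_eq_path (t : List Int) (i : Int) :
    fenRead t i = ((fenPath i).map (fun j => t.getD j.toNat 0)).sum := by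
  suffices H : ∀ (N : Nat) (i : Int), i.toNat ≤ N →
      fenRead t i = ((fenPath i).map (fun j => t.getD j.toNat 0)).sum from H i.toNat i le_rfl
  intro N
  induction N with
  | zero =>
    intro i hi
    rw [fenRead_unfold, fenPath_unfold]
    have : ¬ 0 < i := by omega
    simp [this]
  | succ N ih =>
    intro i hi
    rw [fenRead_unfold, fenPath_unfold]
    by_cases h : 0 < i
    · by_cases h2 : 0 < pyLow i
      · rw [ih (i - pyLow i) (by omega)]; simp [h, h2]
      · simp [h, h2]
    · simp [h]

theorem fenPath_bounds (i : Int) : ∀ j ∈ fenPath i, 0 < j ∧ j ≤ i := by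
  suffices H : ∀ (N : Nat) (i : Int), i.toNat ≤ N → ∀ j ∈ fenPath i, 0 < j ∧ j ≤ i from
    H i.toNat i le_rfl
  intro N
  induction N with
  | zero =>
    intro i hi j hj
    rw [fenPath_unfold] at hj
    have : ¬ 0 < i := by omega
    simp [this] at hj
  | succ N ih =>
    intro i hi j hj
    rw [fenPath_unfold] at hj
    by_cases h : 0 < i
    · rw [if_pos h] at hj
      rcases List.mem_cons.mp hj with rfl | hj
      · exact ⟨h, le_refl _⟩
      · by_cases h2 : 0 < pyLow i
        · rw [if_pos h2] at hj
          have := ih (i - pyLow i) (by omega) j hj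
          omega
        · rw [if_neg h2] at hj; simp at hj
    · rw [if_neg h] at hj; simp at hj

theorem fenPath_nodup (i : Int) : (fenPath i).Nodup := by
  suffices H : ∀ (N : Nat) (i : Int), i.toNat ≤ N → (fenPath i).Nodup from H i.toNat i le_rfl
  intro N
  induction N with
  | zero =>
    intro i hi
    rw [fenPath_unfold]
    have : ¬ 0 < i := by omega
    simp [this]
  | succ N ih =>
    intro i hi
    rw [fenPath_unfold]
    by_cases h : 0 < i
    · rw [if_pos h]
      by_cases h2 : 0 < pyLow i
      · rw [if_pos h2]
        refine List.nodup_cons.mpr ⟨?_, ih (i - pyLow i) (by omega)⟩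
        intro hmem
        have := fenPath_bounds (i - pyLow i) i hmem
        omega
      · rw [if_neg h2]; simp
    · rw [if_neg h]; simp

theorem mem_fenPath (p : Int) (hp : 0 < p) (i : Int) :
    p ∈ fenPath i ↔ p ≤ i ∧ i < p + pyLow p := by
  suffices H : ∀ (N : Nat) (i : Int), i.toNat ≤ N →
      (p ∈ fenPath i ↔ p ≤ i ∧ i < p + pyLow p) from H i.toNat i le_rfl
  intro N
  induction N with
  | zero =>
    intro i hi
    rw [fenPath_unfold]
    have h : ¬ 0 < i := by omega
    simp only [if_neg h, List.not_mem_nil, false_iff]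
    have := pyLow_pos p hp
    omega
  | succ N ih =>
    intro i hi
    rw [fenPath_unfold]
    by_cases h : 0 < i
    · rw [if_pos h]
      have hlp := pyLow_pos p hp
      by_cases hpe : p = i
      · subst hpe
        simp only [List.mem_cons, true_or, true_iff]
        omega
      · have hli := pyLow_pos i h
        rw [List.mem_cons]
        have hrec : p ∈ (if 0 < pyLow i then fenPath (i - pyLow i) else []) ↔
            p ≤ i - pyLow i ∧ i - pyLow i < p + pyLow p := by
          rw [if_pos hli]
          exact ih (i - pyLow i) (by omega)
        rw [hrec]
        rw [key_arith p i hp h hpe]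
        simp [hpe]
    · rw [if_neg h]
      simp only [List.not_mem_nil, false_iff]
      have := pyLow_pos p hp
      omega

theorem sum_map_getD_set (t : List Int) (p val : Int) (hp : 0 < p) (hlen : p.toNat < t.length)
    (l : List Int) (hpos : ∀ j ∈ l, 0 < j) :
    ((l.map (fun j => (t.set p.toNat (t.getD p.toNat 0 + val)).getD j.toNat 0)).sum
      = (l.map (fun j => t.getD j.toNat 0)).sum + val * l.count p) := by
  induction l with
  | nil => simp
  | cons j l ih =>
    have hj : 0 < j := hpos j (List.mem_cons_self)
    have ih' := ih (fun j hj => hpos j (List.mem_cons_of_mem _ hj))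
    by_cases hje : j = p
    · subst hje
      have : (t.set j.toNat (t.getD j.toNat 0 + val)).getD j.toNat 0 = t.getD j.toNat 0 + val := by
        simp [List.getD, hlen]
      simp only [List.map_cons, List.sum_cons, this, ih', List.count_cons_self]
      push_cast; ring
    · have hne : p.toNat ≠ j.toNat := by omega
      have : (t.set p.toNat (t.getD p.toNat 0 + val)).getD j.toNat 0 = t.getD j.toNat 0 := by
        simp [List.getD, List.getElem?_set_ne hne]
      simp only [List.map_cons, List.sum_cons, this, ih', List.count_cons_of_ne (by exact hje)]
      ring

theorem read_set (t : List Int) (p q val : Int) (hp : 0 < p) (hlen : p.toNat < t.length) :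
    fenRead (t.set p.toNat (t.getD p.toNat 0 + val)) q
      = fenRead t q + (if p ∈ fenPath q then val else 0) := by
  rw [fenRead_eq_path, fenRead_eq_path,
    sum_map_getD_set t p val hp hlen (fenPath q) (fun j hj => (fenPath_bounds q j hj).1)]
  by_cases hm : p ∈ fenPath q
  · rw [List.count_eq_one_of_mem (fenPath_nodup q) hm, if_pos hm]; ring
  · rw [List.count_eq_zero_of_not_mem hm, if_neg hm]; ring

theorem fenUpdate_unfold (t : List Int) (n i val : Int) :
    fenUpdate t n i val = if i ≤ n then
      (let t' := t.set i.toNat (t.getD i.toNat 0 + val)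
       if 0 < pyLow i then fenUpdate t' n (i + pyLow i) val else t') else t := by
  rw [fenUpdate]; simp only [dite_eq_ite]

theorem length_fenUpdate (t : List Int) (n i val : Int) :
    (fenUpdate t n i val).length = t.length := by
  suffices H : ∀ (N : Nat) (t : List Int) (i : Int), (n + 1 - i).toNat ≤ N →
      (fenUpdate t n i val).length = t.length from H (n + 1 - i).toNat t i le_rfl
  intro N
  induction N with
  | zero =>
    intro t i hN
    rw [fenUpdate_unfold]
    have : ¬ i ≤ n := by omega
    simp [this]
  | succ N ih =>
    intro t i hN
    rw [fenUpdate_unfold]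
    by_cases h : i ≤ n
    · simp only [if_pos h]
      by_cases h2 : 0 < pyLow i
      · rw [if_pos h2, ih _ _ (by omega)]; simp
      · rw [if_neg h2]; simp
    · simp [h]

theorem read_update (t : List Int) (n p q val : Int) (hp : 0 < p)
    (hq : q ≤ n) (hlen : n < (t.length : Int)) :
    fenRead (fenUpdate t n p val) q = fenRead t q + (if p ≤ q then val else 0) := by
  suffices H : ∀ (N : Nat) (t : List Int) (p : Int), 0 < p → n < (t.length : Int) →
      (n + 1 - p).toNat ≤ N →
      fenRead (fenUpdate t n p val) q = fenRead t q + (if p ≤ q then val else 0) from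
    H (n + 1 - p).toNat t p hp hlen le_rfl
  intro N
  induction N with
  | zero =>
    intro t p hp hlen hN
    rw [fenUpdate_unfold]
    have h : ¬ p ≤ n := by omega
    rw [if_neg h, if_neg (by omega)]
    ring
  | succ N ih =>
    intro t p hp hlen hN
    rw [fenUpdate_unfold]
    by_cases h : p ≤ n
    · simp only [if_pos h]
      have hplen : p.toNat < t.length := by omega
      have hlow := pyLow_pos p hp
      by_cases h2 : 0 < pyLow p
      · rw [if_pos h2]
        rw [ih _ (p + pyLow p) (by omega) (by simpa using hlen) (by omega)]
        rw [read_set t p q val hp hplen]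
        simp only [mem_fenPath p hp q]
        by_cases hc1 : p ≤ q
        · by_cases hc2 : p + pyLow p ≤ q
          · rw [if_neg (by omega), if_pos hc2, if_pos hc1]; ring
          · rw [if_pos (by omega), if_neg hc2, if_pos hc1]; ring
        · rw [if_neg (by omega), if_neg (by omega), if_neg hc1]; ring
      · omega
    · rw [if_neg h, if_neg (by omega)]; ring

def foldRank (l : List (Int × Int)) : PySem.Dict Int Int :=
  (PySem.List.enumerate l 0).foldl (fun d p => d.insert p.2.1 p.1) PySem.Dict.empty

theorem foldRank_snoc (l : List (Int × Int)) (x : Int × Int) :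
    foldRank (l ++ [x]) = (foldRank l).insert x.1 (l.length : Int) := by
  unfold foldRank
  rw [PySem.List.enumerate_append, List.foldl_append]
  simp [PySem.List.enumerate]

theorem getD_foldRank (l : List (Int × Int)) (hpw : (l.map (·.1)).Pairwise (· ≤ ·)) (v : Int)
    (hv : v ∈ l.map (·.1)) :
    (foldRank l).getD v 0 = ((l.map (·.1)).countP (fun u => decide (u ≤ v)) : Int) - 1 := by
  induction l using List.reverseRecOn with
  | nil => simp at hv
  | append_singleton l x ih =>
    rw [foldRank_snoc, PySem.Dict.getD_insert]
    have hmap : (l ++ [x]).map (·.1) = l.map (·.1) ++ [x.1] := by simp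
    rw [hmap] at hpw hv ⊢
    have hall : ∀ u ∈ l.map (·.1), u ≤ x.1 := by
      intro u hu
      exact (List.pairwise_append.mp hpw).2.2 u hu x.1 (List.mem_singleton_self _)
    rw [List.countP_append]
    by_cases hvx : v = x.1
    · rw [if_pos hvx]
      have h1 : (l.map (·.1)).countP (fun u => decide (u ≤ v)) = (l.map (·.1)).length := by
        apply List.countP_eq_length.mpr
        intro u hu
        simp [hvx ▸ hall u hu]
      rw [h1]
      subst hvx
      simp
    · rw [if_neg hvx]
      have hv' : v ∈ l.map (·.1) := by
        rcases List.mem_append.mp hv with h | h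
        · exact h
        · simp at h; exact absurd h hvx
      have hvlt : v < x.1 := lt_of_le_of_ne (hall v hv') hvx
      have h2 : List.countP (fun u => decide (u ≤ v)) [x.1] = 0 := by
        simp; omega
      rw [h2, ih (List.pairwise_append.mp hpw).1 hv']
      simp

-- keys and counting
def cntLe (a : List (Int × Int)) (v : Int) : Int :=
  ((a.map (·.1)).countP (fun u => decide (u ≤ v)) : Int)

def rankD (a : List (Int × Int)) : PySem.Dict Int Int :=
  foldRank (PySem.List.sorted a (fun x => x.1) false)

theorem rankD_getD (a : List (Int × Int)) (v : Int) (hv : v ∈ a.map (·.1)) :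
    (rankD a).getD v 0 = cntLe a v - 1 := by
  have hperm : (PySem.List.sorted a (fun x => x.1) false).Perm a :=
    PySem.List.sorted_perm a (fun x => x.1) false
  have hpw : ((PySem.List.sorted a (fun x => x.1) false).map (·.1)).Pairwise (· ≤ ·) := by
    rw [List.pairwise_map]
    exact PySem.List.sorted_pairwise a (fun x => x.1)
  have hv' : v ∈ (PySem.List.sorted a (fun x => x.1) false).map (·.1) :=
    (hperm.map (·.1)).mem_iff.mpr hv
  rw [rankD, getD_foldRank _ hpw v hv', cntLe,
    (hperm.map (·.1)).countP_eq (fun u => decide (u ≤ v))]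

theorem cntLe_pos (a : List (Int × Int)) (v : Int) (hv : v ∈ a.map (·.1)) : 1 ≤ cntLe a v := by
  rw [cntLe]
  have : 0 < (a.map (·.1)).countP (fun u => decide (u ≤ v)) := by
    rw [List.countP_pos_iff]
    exact ⟨v, hv, by simp⟩
  omega

theorem cntLe_le (a : List (Int × Int)) (v : Int) : cntLe a v ≤ (a.length : Int) := by
  rw [cntLe]
  have := List.countP_le_length (p := fun u => decide (u ≤ v)) (l := a.map (·.1))
  simp at this ⊢
  omega

theorem countP_le_split (l : List Int) (u v : Int) (hvu : v < u) :
    l.countP (fun w => decide (w ≤ u))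
      = l.countP (fun w => decide (w ≤ v)) + l.countP (fun w => decide (v < w ∧ w ≤ u)) := by
  induction l with
  | nil => simp
  | cons w l ih =>
    rw [List.countP_cons, List.countP_cons, List.countP_cons, ih]
    by_cases h1 : w ≤ u <;> by_cases h3 : v < w <;>
      first
      | (simp [h1, h3, show w ≤ v from by omega]; omega)
      | (simp [h1, h3, show ¬ w ≤ v from by omega]; omega)
      | (simp [h1, h3, show w ≤ v from by omega])
      | (simp [h1, h3, show ¬ w ≤ v from by omega])

theorem cntLe_mono_iff (a : List (Int × Int)) (u v : Int) (hu : u ∈ a.map (·.1)) :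
    cntLe a u ≤ cntLe a v ↔ u ≤ v := by
  constructor
  · intro h
    by_contra hc
    push Not at hc
    have hsplit := countP_le_split (a.map (·.1)) u v hc
    have hone : 0 < (a.map (·.1)).countP (fun w => decide (v < w ∧ w ≤ u)) := by
      rw [List.countP_pos_iff]
      exact ⟨u, hu, by simp; omega⟩
    rw [cntLe, cntLe] at h
    omega
  · intro h
    rw [cntLe, cntLe]
    have := List.countP_mono_left (l := a.map (·.1))
      (p := fun w => decide (w ≤ u)) (q := fun w => decide (w ≤ v)) (by intro x _ hx; simp at hx ⊢; omega)
    omega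

theorem sumAbs_eq (v : Int) (prev : List Int) :
    sumAbs v prev = (prev.map (fun u => |v - u|)).sum := by
  suffices H : ∀ s, prev.foldl (fun s u => s + |v - u|) s = s + (prev.map (fun u => |v - u|)).sum by
    have := H 0; simpa [sumAbs] using this
  induction prev with
  | nil => simp
  | cons u l ih => intro s; simp [List.foldl_cons, ih]; ring

theorem step_formula (v : Int) (prev : List Int) :
    prev.sum - 2 * (prev.filter (fun u => decide (u ≤ v))).sum
      + v * (2 * ((prev.filter (fun u => decide (u ≤ v))).length : Int) - (prev.length : Int))
      = sumAbs v prev := by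
  rw [sumAbs_eq]
  induction prev with
  | nil => simp
  | cons u l ih =>
    by_cases h : u ≤ v
    · have habs : |v - u| = v - u := abs_of_nonneg (by omega)
      simp only [List.filter_cons, decide_eq_true_eq, if_pos h, List.sum_cons, List.length_cons,
        List.map_cons, habs]
      push_cast
      linear_combination ih
    · have habs : |v - u| = -(v - u) := abs_of_neg (by omega)
      simp only [List.filter_cons, decide_eq_true_eq, if_neg h, List.sum_cons, List.length_cons,
        List.map_cons, habs]
      push_cast
      linear_combination ih

theorem fenRead_replicate (k : Nat) (q : Int) : fenRead (List.replicate k 0) q = 0 := by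
  rw [fenRead_eq_path]
  apply List.sum_eq_zero
  intro x hx
  obtain ⟨j, _, hj⟩ := List.mem_map.mp hx
  rw [← hj]
  simp [List.getD, List.getElem?_replicate]
  split <;> rfl

theorem loop_spec (a : List (Int × Int)) :
    ∀ (rest : List (Int × Int)) (prev cts sms res : List Int),
    (∀ x ∈ rest, x.1 ∈ a.map (·.1)) →
    (∀ u ∈ prev, u ∈ a.map (·.1)) →
    cts.length = a.length + 1 →
    sms.length = a.length + 1 →
    (∀ q : Int, q ≤ (a.length : Int) →
      fenRead cts q = ((prev.filter (fun u => decide ((rankD a).getD u 0 + 1 ≤ q))).length : Int)) →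
    (∀ q : Int, q ≤ (a.length : Int) →
      fenRead sms q = (prev.filter (fun u => decide ((rankD a).getD u 0 + 1 ≤ q))).sum) →
    solveLoop (rankD a) (a.length : Int) (PySem.List.enumerate rest (prev.length : Int))
        cts sms prev.sum res
      = res ++ altLoop prev rest := by
  intro rest
  induction rest with
  | nil =>
    intro prev cts sms res _ _ _ _ _ _
    simp [PySem.List.enumerate_nil, solveLoop, altLoop]
  | cons x rest ih =>
    intro prev cts sms res hrest hprev hclen hslen hc hs
    rw [PySem.List.enumerate_cons, solveLoop]
    have hx1 : x.1 ∈ a.map (·.1) := hrest x List.mem_cons_self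
    have hrk : (rankD a).getD x.1 0 = cntLe a x.1 - 1 := rankD_getD a x.1 hx1
    have hr0 : 0 ≤ (rankD a).getD x.1 0 := by have := cntLe_pos a x.1 hx1; omega
    have hrn : (rankD a).getD x.1 0 + 1 ≤ (a.length : Int) := by
      have := cntLe_le a x.1; omega
    have hfilter : prev.filter (fun u => decide ((rankD a).getD u 0 + 1 ≤ (rankD a).getD x.1 0 + 1))
        = prev.filter (fun u => decide (u ≤ x.1)) := by
      apply List.filter_congr
      intro u hu
      have hu1 := hprev u hu
      have hrku : (rankD a).getD u 0 = cntLe a u - 1 := rankD_getD a u hu1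
      have hmono := cntLe_mono_iff a u x.1 hu1
      simp only [decide_eq_decide]
      omega
    have hnum := hc ((rankD a).getD x.1 0 + 1) hrn
    have hsm := hs ((rankD a).getD x.1 0 + 1) hrn
    rw [hfilter] at hnum hsm
    have hval : (prev.sum - 2 * fenRead sms ((rankD a).getD x.1 0 + 1)
          + x.1 * (2 * fenRead cts ((rankD a).getD x.1 0 + 1) - (prev.length : Int))) * x.2
        = sumAbs x.1 prev * x.2 := by
      rw [hnum, hsm, ← step_formula x.1 prev]
    have hcl : (a.length : Int) < (cts.length : Int) := by rw [hclen]; omega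
    have hsl : (a.length : Int) < (sms.length : Int) := by rw [hslen]; omega
    have hstep := ih (prev ++ [x.1])
      (fenUpdate cts (a.length : Int) ((rankD a).getD x.1 0 + 1) 1)
      (fenUpdate sms (a.length : Int) ((rankD a).getD x.1 0 + 1) x.1)
      (res ++ [sumAbs x.1 prev * x.2])
      (fun y hy => hrest y (List.mem_cons_of_mem _ hy))
      (by intro u hu
          rcases List.mem_append.mp hu with h | h
          · exact hprev u h
          · simp at h; subst h; exact hx1)
      (by rw [length_fenUpdate, hclen])
      (by rw [length_fenUpdate, hslen])
      (by intro q hq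
          rw [read_update cts (a.length : Int) _ q 1 (by omega) hq hcl, hc q hq,
            List.filter_append]
          by_cases hcond : (rankD a).getD x.1 0 + 1 ≤ q
          · rw [if_pos hcond]
            simp only [List.filter_cons, List.filter_nil, decide_eq_true_eq, if_pos hcond]
            push_cast; simp
          · rw [if_neg hcond]
            simp only [List.filter_cons, List.filter_nil, decide_eq_true_eq, if_neg hcond]
            push_cast; simp)
      (by intro q hq
          rw [read_update sms (a.length : Int) _ q x.1 (by omega) hq hsl, hs q hq,
            List.filter_append]
          by_cases hcond : (rankD a).getD x.1 0 + 1 ≤ q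
          · rw [if_pos hcond]
            simp only [List.filter_cons, List.filter_nil, decide_eq_true_eq, if_pos hcond]
            simp
          · rw [if_neg hcond]
            simp only [List.filter_cons, List.filter_nil, decide_eq_true_eq, if_neg hcond]
            simp)
    rw [List.length_append, List.sum_append] at hstep
    simp only [List.length_cons, List.length_nil, List.sum_cons, List.sum_nil] at hstep
    rw [hval]
    push_cast at hstep ⊢
    rw [show prev.sum + (x.1 + 0) = prev.sum + x.1 from by ring] at hstep
    rw [hstep, altLoop]
    simp

theorem solve_eq_alt (a : List (Int × Int)) : solve a = solve_alt a := by
  have h := loop_spec a a [] (List.replicate (a.length + 1) 0) (List.replicate (a.length + 1) 0) []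
    (fun x hx => List.mem_map_of_mem hx)
    (by simp) (by simp) (by simp)
    (fun q _ => by rw [fenRead_replicate]; simp)
    (fun q _ => by rw [fenRead_replicate]; simp)
  simp only [List.length_nil, List.sum_nil, List.nil_append, Nat.cast_zero] at h
  exact h

-- ===== VERDICT (by name: the statement is the Claim_ definition above) =====
theorem solve_spec : Claim_equal_solve := by
  intro a _
  exact solve_eq_alt a
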